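-- pv_equiv track=rewrite | github.com/labust/csbenchlab | csbenchlab/plugin/PluginBase.py | parse_positional_args
-- ===== SOURCE A (Python) =====
-- def parse_positional_args(args):
--     """Parse positional arguments and return a dictionary of parameters."""
--     if len(args) == 0:
--         return {}
--     i = 0
--     parsed = {}
--     while True:
--         if i >= len(args):
--             break
--         if isinstance(args[i], str):
--             if i + 1 < len(args):
--                 parsed[args[i]] = args[i + 1]
--             else:
--                 parsed[args[i]] = None
--         i += 2
--     return parsed
-- ===== SOURCE B (Python) =====
-- def parse_positional_args(args):
--     """Parse positional arguments and return a dictionary of parameters."""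
--     it = iter(args)
--     return {key: next(it, None) for key in it}
-- ===== Notes on version B (the rewrite author's own statement) =====
-- stated objective: idiomatic
-- what changed: Replaces the explicit index-stepping while-loop with bounds checks by the standard iterator-pairing idiom: make one iterator over args and build the dict with a comprehension that pulls the key from the iterator and its value via next(it, None), which handles the trailing odd key naturally.
import Mathlib
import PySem

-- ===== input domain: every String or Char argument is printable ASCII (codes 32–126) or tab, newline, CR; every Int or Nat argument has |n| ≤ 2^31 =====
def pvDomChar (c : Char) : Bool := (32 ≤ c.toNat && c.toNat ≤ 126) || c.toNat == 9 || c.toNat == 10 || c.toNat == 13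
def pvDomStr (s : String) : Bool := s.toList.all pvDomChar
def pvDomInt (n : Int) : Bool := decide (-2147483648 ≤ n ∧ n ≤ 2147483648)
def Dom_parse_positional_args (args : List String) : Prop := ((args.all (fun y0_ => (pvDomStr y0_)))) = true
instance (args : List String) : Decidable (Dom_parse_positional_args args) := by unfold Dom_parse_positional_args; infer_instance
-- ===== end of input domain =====

-- ===== PORT A =====
-- B replaces A's index-stepping while-loop by the iterator-pairing dict comprehension
-- {key: next(it, None) for key in it}; same return value, idiomatic decomposition.
-- (isinstance(args[i], str) is always true here: args is a list of strings.)

-- A's `while True` loop: index i steps by 2; dict assignment per key.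
def pvLoopA (args : List String) (i : Nat) (parsed : PySem.Dict String (Option String)) :
    PySem.Dict String (Option String) :=
  if h : i ≥ args.length then parsed
  else
    -- isinstance(args[i], str) is True (list of str)
    let parsed :=
      if i + 1 < args.length then
        parsed.insert args[i] (some (args.getD (i + 1) ""))  -- getD exact: i+1 < length here
      else
        parsed.insert args[i] none
    pvLoopA args (i + 2) parsed
termination_by args.length - i
decreasing_by omega

def parse_positional_args (args : List String) : List (String × Option String) :=
  if args.length = 0 then []
  else (pvLoopA args 0 PySem.Dict.empty).items

-- ===== PORT B =====
-- the comprehension's traversal: pull a key from the iterator, then its value via next(it, None)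
def pvPairsB : List String → List (String × Option String)
  | [] => []
  | [k] => [(k, none)]
  | k :: v :: rest => (k, some v) :: pvPairsB rest

def parse_positional_args_alt (args : List String) : List (String × Option String) :=
  ((pvPairsB args).foldl (fun d p => d.insert p.1 p.2) PySem.Dict.empty).items

-- ===== PRECONDITION & SPEC =====
def Spec_parse_positional_args (args : List String) (out : List (String × Option String)) : Prop := out = parse_positional_args_alt args
instance (args : List String) (out : List (String × Option String)) : Decidable (Spec_parse_positional_args args out) := by unfold Spec_parse_positional_args; infer_instance

-- ===== CLAIM (what is proved, stated in full; the proofs are below) =====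
def Claim_equal_parse_positional_args : Prop := ∀ (args : List String), Dom_parse_positional_args args → Spec_parse_positional_args args (parse_positional_args args)

-- ===== LEMMAS AND PROOFS =====

-- A's loop from index i equals B's fold over the pairs of the remaining suffix.
theorem pvLoopA_eq (args : List String) :
    ∀ n i d, args.length - i ≤ n → pvLoopA args i d =
      (pvPairsB (args.drop i)).foldl (fun d p => d.insert p.1 p.2) d := by
  intro n
  induction n with
  | zero =>
    intro i d hn
    have h : i ≥ args.length := by omega
    rw [pvLoopA]
    simp [h, List.drop_eq_nil_of_le h, pvPairsB]
  | succ n ih =>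
    intro i d hn
    rw [pvLoopA]
    by_cases h : i ≥ args.length
    · simp [h, List.drop_eq_nil_of_le h, pvPairsB]
    · have hi : i < args.length := by omega
      have hd : args.drop i = args[i] :: args.drop (i + 1) :=
        List.drop_eq_getElem_cons hi
      simp only [h, dite_false]
      by_cases h2 : i + 1 < args.length
      · have hd2 : args.drop (i + 1) = args[i + 1] :: args.drop (i + 2) :=
          List.drop_eq_getElem_cons h2
        have hg : args.getD (i + 1) "" = args[i + 1] := by
          simp [List.getD_eq_getElem?_getD, List.getElem?_eq_getElem h2]
        rw [ih (i + 2) _ (by omega), hd, hd2, hg]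
        simp [pvPairsB, h2]
      · have hd2 : args.drop (i + 1) = [] :=
          List.drop_eq_nil_of_le (by omega)
        have hd3 : args.drop (i + 2) = [] :=
          List.drop_eq_nil_of_le (by omega)
        rw [ih (i + 2) _ (by omega), hd, hd2, hd3]
        simp [pvPairsB, h2]

-- ===== VERDICT (by name: the statement is the Claim_ definition above) =====
theorem parse_positional_args_spec : Claim_equal_parse_positional_args := by
  intro args _
  unfold Spec_parse_positional_args parse_positional_args parse_positional_args_alt
  by_cases h0 : args.length = 0
  · have : args = [] := List.eq_nil_of_length_eq_zero h0
    subst this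
    simp [pvPairsB, PySem.Dict.empty]
  · simp only [h0, if_false]
    rw [pvLoopA_eq args args.length 0 PySem.Dict.empty (by omega)]
    simp
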